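-- pv_equiv track=rewrite | github.com/woorud/Crawling | programmers/종이접기.py | solution
-- ===== SOURCE A (Python) =====
-- def solution(n):
--     res = [0]
--
--     for i in range(n-1):
--         tmp = []
--         for j in range(len(res)):
--             if res[j] == 0:
--                 tmp.append(1)
--             elif res[j] == 1:
--                 tmp.append(0)
--         tmp.reverse()
--         res = res + [0] + tmp
--
--
--     return res
-- ===== SOURCE B (Python) =====
-- def solution(n):
--     if n <= 1:
--         return [0]
--     out = []
--     for p in range(1, 2 ** n):
--         m = p
--         while m % 2 == 0:
--             m //= 2
--         out.append(0 if m % 4 == 1 else 1)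
--     return out
-- ===== Notes on version B (the rewrite author's own statement) =====
-- stated objective: alternative
-- what changed: Replaces A's iterative doubling of the crease list (copy + complement + reverse around a central 0, n-1 times) with a direct per-position closed form: for each position p in 1..2**n-1, strip factors of 2 from p and emit 0 iff the odd part is 1 mod 4.
import Mathlib
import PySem

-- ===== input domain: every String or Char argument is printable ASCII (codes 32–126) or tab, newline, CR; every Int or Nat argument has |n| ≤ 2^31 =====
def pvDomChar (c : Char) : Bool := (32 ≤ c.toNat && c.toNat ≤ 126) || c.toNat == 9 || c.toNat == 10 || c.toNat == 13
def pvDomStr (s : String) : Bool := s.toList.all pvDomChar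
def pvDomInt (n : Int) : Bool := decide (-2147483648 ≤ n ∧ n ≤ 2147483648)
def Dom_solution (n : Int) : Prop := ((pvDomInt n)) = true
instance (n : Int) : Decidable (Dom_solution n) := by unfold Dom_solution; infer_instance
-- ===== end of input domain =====

-- B replaces A's iterative doubling (copy + complement + reverse around a centre 0) by a
-- closed-form per-position rule of the paper-folding sequence; objective: alternative.

-- ===== PORT A =====
def solution (n : Int) : List Int :=
  (PySem.List.pyRange 0 (n - 1) 1).foldl
    (fun res _ =>
      let tmp := (PySem.List.pyRange 0 (PySem.List.len res) 1).foldl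
        (fun t j =>
          match PySem.List.pyGet? res j with
          | some 0 => t ++ [1]
          | some 1 => t ++ [0]
          | _ => t) ([] : List Int)
      res ++ [0] ++ tmp.reverse)
    [0]

-- ===== PORT B =====
-- strip factors of 2 (the `while m % 2 == 0: m //= 2` loop of Source B)
def oddPart (p : Nat) : Nat :=
  if h : p % 2 = 0 ∧ p ≠ 0 then oddPart (p / 2) else p
termination_by p
decreasing_by exact Nat.div_lt_self (Nat.pos_of_ne_zero h.2) one_lt_two

def solution_alt (n : Int) : List Int :=
  if n ≤ 1 then [0]
  else (PySem.List.pyRange 1 ((2 : Int) ^ n.toNat) 1).map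
    (fun p => if oddPart p.toNat % 4 = 1 then (0 : Int) else 1)

-- ===== PRECONDITION & SPEC =====
def Spec_solution (n : Int) (out : List Int) : Prop := out = solution_alt n
instance (n : Int) (out : List Int) : Decidable (Spec_solution n out) := by unfold Spec_solution; infer_instance

-- ===== CLAIM (what is proved, stated in full; the proofs are below) =====
def Claim_equal_solution : Prop := ∀ (n : Int), Dom_solution n → Spec_solution n (solution n)

-- ===== LEMMAS AND PROOFS =====

-- the closed-form bit: B's per-position value, on Nat
def fb (p : Nat) : Int := if oddPart p % 4 = 1 then 0 else 1

-- A's doubling step, in mathematical form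
def stepA (res : List Int) : List Int := res ++ [0] ++ (res.map (fun x => 1 - x)).reverse

lemma oddPart_odd (p : Nat) (h : p % 2 = 1) : oddPart p = p := by
  rw [oddPart]; simp [h]

lemma oddPart_two_mul (m : Nat) (h : m ≠ 0) : oddPart (2 * m) = oddPart m := by
  rw [oddPart]
  have h2 : 2 * m / 2 = m := by omega
  simp [h2, Nat.mul_mod_right, h]

lemma oddPart_two_pow (m : Nat) : oddPart (2 ^ m) = 1 := by
  induction m with
  | zero => rw [oddPart]; simp
  | succ k ih =>
      rw [pow_succ, mul_comm, oddPart_two_mul _ (by positivity)]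
      exact ih

lemma fb_zero_or_one (p : Nat) : fb p = 0 ∨ fb p = 1 := by
  unfold fb; split <;> simp

-- mirror symmetry: positions 2^m - j and 2^m + j carry complementary creases
lemma fb_mirror (m : Nat) (hm : 1 ≤ m) : ∀ j, 1 ≤ j → j < 2 ^ m →
    fb (2 ^ m + j) = 1 - fb (2 ^ m - j) := by
  induction m with
  | zero => omega
  | succ k ih =>
      intro j hj1 hj2
      have h2k : (2:Nat) ^ (k+1) = 2 * 2 ^ k := by ring
      rcases Nat.even_or_odd j with he | ho
      · -- j even: divide everything by 2
        obtain ⟨j', rfl⟩ := he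
        have hk1 : 1 ≤ k := by
          rcases Nat.eq_zero_or_pos k with h0 | h0
          · subst h0; omega
          · omega
        have hj'1 : 1 ≤ j' := by omega
        have hj'2 : j' < 2 ^ k := by omega
        have e1 : 2 ^ (k+1) + (j' + j') = 2 * (2 ^ k + j') := by omega
        have e2 : 2 ^ (k+1) - (j' + j') = 2 * (2 ^ k - j') := by omega
        rw [e1, e2]
        unfold fb
        rw [oddPart_two_mul _ (by omega), oddPart_two_mul _ (by omega)]
        have := ih hk1 j' hj'1 hj'2
        unfold fb at this
        exact this
      · -- j odd: both positions are odd, compare mod 4 directly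
        have hjo : j % 2 = 1 := Nat.odd_iff.mp ho
        have h1 : (2 ^ (k+1) + j) % 2 = 1 := by omega
        have h2 : (2 ^ (k+1) - j) % 2 = 1 := by omega
        unfold fb
        rw [oddPart_odd _ h1, oddPart_odd _ h2]
        rcases Nat.eq_zero_or_pos k with h0 | h0
        · subst h0
          have : j = 1 := by omega
          subst this
          norm_num
        · have h4 : (2:Nat) ^ (k+1) % 4 = 0 := by
            have e : (2:Nat) ^ (k+1) = 4 * 2 ^ (k-1) := by
              rw [show (4:Nat) = 2 ^ 2 from rfl, ← pow_add]
              congr 1; omega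
            omega
          split_ifs with ha hb hb <;> omega

-- the second half of the doubled list is the reversed complement of the first half
lemma second_half_eq (k : Nat) :
    (List.range' (2 ^ (k+1) + 1) (2 ^ (k+1) - 1)).map fb
      = (((List.range' 1 (2 ^ (k+1) - 1)).map fb).map (fun x => 1 - x)).reverse := by
  apply List.ext_getElem
  · simp
  · intro i h1 h2
    have hN : 0 < 2 ^ (k+1) := Nat.two_pow_pos _
    have hi : i < 2 ^ (k+1) - 1 := by simpa using h1
    simp only [List.getElem_map, List.getElem_range', List.getElem_reverse,
      List.length_map, List.length_range', one_mul]
    have e1 : 2 ^ (k+1) + 1 + i = 2 ^ (k+1) + (i + 1) := by omega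
    have e2 : 1 + (2 ^ (k+1) - 1 - 1 - i) = 2 ^ (k+1) - (i + 1) := by omega
    rw [e1, e2]
    exact fb_mirror (k+1) (by omega) (i+1) (by omega) (by omega)

-- one doubling step advances the closed form
lemma stepA_closed (k : Nat) :
    stepA ((List.range' 1 (2 ^ (k+1) - 1)).map fb)
      = (List.range' 1 (2 ^ (k+2) - 1)).map fb := by
  have hN : 0 < 2 ^ (k+1) := Nat.two_pow_pos _
  have hsplit : List.range' 1 (2 ^ (k+2) - 1)
      = List.range' 1 (2 ^ (k+1) - 1) ++ 2 ^ (k+1) :: List.range' (2 ^ (k+1) + 1) (2 ^ (k+1) - 1) := by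
    obtain ⟨M, hM⟩ : ∃ M, 2 ^ (k+1) = M + 1 := ⟨2 ^ (k+1) - 1, by omega⟩
    have h1 : List.range' 1 M ++ List.range' (1 + 1 * M) (M + 1) 1
        = List.range' 1 (M + (M + 1)) 1 := List.range'_append
    have ha : 2 ^ (k+2) - 1 = M + (M + 1) := by
      have : (2:Nat) ^ (k+2) = 2 * 2 ^ (k+1) := by ring
      omega
    have hb : 2 ^ (k+1) - 1 = M := by omega
    rw [ha, hb, hM, ← h1]
    congr 1
    have e0 : 1 + 1 * M = M + 1 := by ring
    rw [e0, List.range'_succ]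
  rw [hsplit]
  simp only [List.map_append, List.map_cons]
  rw [second_half_eq k]
  have hc : fb (2 ^ (k+1)) = 0 := by simp [fb, oddPart_two_pow]
  simp [stepA, hc]

-- inner loop of A = complement map, for 0/1 lists
lemma inner_loop_aux (L : List Int) (h : ∀ x ∈ L, x = 0 ∨ x = 1) :
    ∀ (k : Nat), k ≤ L.length → ∀ (t : List Int),
    (List.range k).foldl
      (fun (t : List Int) (j : Nat) =>
        match PySem.List.pyGet? L ((0:Int) + ((j:Nat):Int)) with
        | some 0 => t ++ [1]
        | some 1 => t ++ [0]
        | _ => t) t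
    = t ++ (L.take k).map (fun x => 1 - x) := by
  intro k
  induction k with
  | zero => intro _ t; simp
  | succ k ih =>
      intro hk t
      rw [List.range_succ, List.foldl_append, ih (by omega)]
      have hk' : k < L.length := by omega
      rcases h L[k] (List.getElem_mem _) with h0 | h1
      · simp [List.take_add_one, List.getElem?_eq_getElem hk', h0]
      · simp [List.take_add_one, List.getElem?_eq_getElem hk', h1]

lemma inner_loop_eq (L : List Int) (h : ∀ x ∈ L, x = 0 ∨ x = 1) :
    (PySem.List.pyRange 0 (PySem.List.len L) 1).foldl
      (fun t j =>
        match PySem.List.pyGet? L j with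
        | some 0 => t ++ [1]
        | some 1 => t ++ [0]
        | _ => t) ([] : List Int)
    = L.map (fun x => 1 - x) := by
  rw [PySem.List.len_eq, PySem.List.pyRange_one, List.foldl_map]
  have e : ((L.length : Int) - 0).toNat = L.length := by omega
  rw [e]
  have := inner_loop_aux L h L.length (le_refl _) []
  simpa using this

-- outer loop = iterate
lemma foldl_iterate {α β : Type} (g : α → α) (init : α) (l : List β) :
    l.foldl (fun r _ => g r) init = g^[l.length] init := by
  induction l generalizing init with
  | nil => rfl
  | cons x xs ih => simp [List.foldl_cons, ih, Function.iterate_succ_apply]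

-- k doubling steps from [0] give the folding sequence at positions 1 .. 2^(k+1)-1
lemma solution_closed (k : Nat) :
    (fun res : List Int =>
      let tmp := (PySem.List.pyRange 0 (PySem.List.len res) 1).foldl
        (fun t j =>
          match PySem.List.pyGet? res j with
          | some 0 => t ++ [1]
          | some 1 => t ++ [0]
          | _ => t) ([] : List Int)
      res ++ [0] ++ tmp.reverse)^[k] ([0] : List Int)
    = (List.range' 1 (2 ^ (k+1) - 1)).map fb := by
  induction k with
  | zero =>
      simp only [Function.iterate_zero, id]
      have : fb 1 = 0 := by simp [fb, oddPart_odd 1 (by norm_num)]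
      simp [List.range'_one, this]
  | succ k ih =>
      rw [Function.iterate_succ_apply', ih]
      have hmem : ∀ x ∈ (List.range' 1 (2 ^ (k+1) - 1)).map fb, x = 0 ∨ x = 1 := by
        intro x hx
        obtain ⟨p, _, rfl⟩ := List.mem_map.mp hx
        exact fb_zero_or_one p
      simp only []
      rw [inner_loop_eq _ hmem]
      exact stepA_closed k

-- ===== VERDICT (by name: the statement is the Claim_ definition above) =====
theorem solution_spec : Claim_equal_solution := by
  intro n _
  show solution n = solution_alt n
  by_cases hn : n ≤ 1
  · simp [solution, solution_alt, hn, PySem.List.pyRange_one]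
  · have hn2 : 2 ≤ n := by omega
    unfold solution
    rw [foldl_iterate, PySem.List.length_pyRange_one]
    rw [solution_closed ((n - 1 - 0).toNat)]
    unfold solution_alt
    rw [if_neg (by omega)]
    rw [PySem.List.pyRange_one, List.map_map]
    have hpow : ((2:Int) ^ n.toNat - 1).toNat = 2 ^ n.toNat - 1 := by
      have : ((2:Int) ^ n.toNat) = ((2 ^ n.toNat : Nat) : Int) := by push_cast; ring
      rw [this]
      omega
    have hk : (n - 1 - 0).toNat + 1 = n.toNat := by omega
    rw [hpow, hk, List.range'_eq_map_range, List.map_map]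
    apply List.map_congr_left
    intro p _
    simp only [Function.comp]
    have e2 : ((1:Int) + (p:Int)).toNat = 1 + p := by omega
    rw [e2]
    rfl
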